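-- pv_equiv track=rewrite | github.com/DarkMatro/RS-tool | src/data/work_with_arrays.py | extend_bool_mask
-- ===== SOURCE A (Python) =====
-- def extend_bool_mask(x: list[bool], window_size: int = 2) -> list[bool]:
--     """
--     Makes False value with True if near this value +- window_size in the list True stored.
--
--     Parameters
--     ----------
--     x : array_like of bool
--         Input array
--     window_size: int
--         distance from current cell to find False values
--
--     Returns
--     -------
--     out : list[bool]
--
--     Examples
--     --------
--     >>> x = [False, False, False, True, True, True, False, False, False]
--     >>> extend_bool_mask(x)
--     [False, False, True, True, True, True, False, False, False]
--
--     >>> x = [False, True, False, False, False, True, False, False, False]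
--     >>> extend_bool_mask(x)
--     [True, True, False, False, True, True, False, False, False]
--     """
--     out = []
--     for i in range(len(x) - window_size + 1):
--         wind = x[i:i + window_size]
--         count_of_true = wind.count(True)
--         out.append(count_of_true > 0)
--     out.append(x[-1])
--     return out
-- ===== SOURCE B (Python) =====
-- def extend_bool_mask(x: list[bool], window_size: int = 2) -> list[bool]:
--     # Prefix-sum of True-counts: window has a True iff pref[i+w] - pref[i] > 0.
--     pref = [0]
--     for v in x:
--         pref.append(pref[-1] + (1 if v else 0))
--     out = [pref[i + window_size] - pref[i] > 0
--            for i in range(len(x) - window_size + 1)]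
--     out.append(x[-1])
--     return out
-- ===== Notes on version B (the rewrite author's own statement) =====
-- stated objective: faster
-- what changed: replaces per-window slicing and recounting (O(n*w)) with a single prefix-sum pass, each window answered by one subtraction
-- outside the precondition, e.g. on extend_bool_mask([True, False], -1): A returns [True, False, False, False, False], B raises IndexError; on extend_bool_mask([], 2): A raises IndexError, B raises IndexError
import Mathlib
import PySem

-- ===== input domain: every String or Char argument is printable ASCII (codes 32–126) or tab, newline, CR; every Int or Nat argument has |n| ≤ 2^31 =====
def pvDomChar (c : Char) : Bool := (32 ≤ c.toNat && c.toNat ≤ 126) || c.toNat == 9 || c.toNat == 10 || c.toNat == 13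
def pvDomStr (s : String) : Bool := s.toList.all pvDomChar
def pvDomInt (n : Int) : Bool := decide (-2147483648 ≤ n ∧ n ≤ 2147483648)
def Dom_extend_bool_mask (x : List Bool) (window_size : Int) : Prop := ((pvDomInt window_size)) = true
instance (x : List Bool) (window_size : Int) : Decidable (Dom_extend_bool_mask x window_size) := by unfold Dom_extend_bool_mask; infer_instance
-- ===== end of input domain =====

-- B replaces A's per-window slice-and-recount with one prefix-sum pass (faster: O(n) vs O(n*w)).

-- ===== PORT A =====
-- x[-1] (an IndexError on empty x) is ported with pyGetD; Pre_ excludes x = [].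
def extend_bool_mask (x : List Bool) (window_size : Int) : List Bool :=
  let out := (PySem.List.pyRange 0 ((x.length : Int) - window_size + 1) 1).foldl
    (fun out i =>
      let wind := PySem.List.slice x (some i) (some (i + window_size))
      let count_of_true := PySem.List.count wind true
      out ++ [decide (count_of_true > 0)]) []
  out ++ [PySem.List.pyGetD x (-1) false]

-- ===== PORT B =====
-- pref[-1], pref[i], pref[i+window_size], x[-1] are ported with pyGetD; inside
-- Pre_ every such index is in range, exactly where Python B returns.
def extend_bool_mask_alt (x : List Bool) (window_size : Int) : List Bool :=
  let pref := x.foldl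
    (fun pref v => pref ++ [PySem.List.pyGetD pref (-1) 0 + (if v then (1 : Int) else 0)])
    [(0 : Int)]
  let out := (PySem.List.pyRange 0 ((x.length : Int) - window_size + 1) 1).map
    (fun i => decide (PySem.List.pyGetD pref (i + window_size) 0 - PySem.List.pyGetD pref i 0 > 0))
  out ++ [PySem.List.pyGetD x (-1) false]

-- ===== PRECONDITION & SPEC =====
-- Pre_ excludes x = [] (A raises IndexError on x[-1]) and negative window_size,
-- where no dilation window is meaningful, A's all-but-first-False output is an
-- accident of Python's negative slicing, and B itself raises IndexError.
def Pre_extend_bool_mask (x : List Bool) (window_size : Int) : Prop :=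
  x ≠ [] ∧ 0 ≤ window_size
instance (x : List Bool) (window_size : Int) : Decidable (Pre_extend_bool_mask x window_size) := by
  unfold Pre_extend_bool_mask; infer_instance

def pvWitness_extend_bool_mask : List Bool × Int := ([false, true, false, false], 2)

def Spec_extend_bool_mask (x : List Bool) (window_size : Int) (out : List Bool) : Prop := out = extend_bool_mask_alt x window_size
instance (x : List Bool) (window_size : Int) (out : List Bool) : Decidable (Spec_extend_bool_mask x window_size out) := by unfold Spec_extend_bool_mask; infer_instance

-- ===== CLAIM (what is proved, stated in full; the proofs are below) =====
def Claim_equal_extend_bool_mask : Prop := ∀ (x : List Bool) (window_size : Int), Dom_extend_bool_mask x window_size → Pre_extend_bool_mask x window_size → Spec_extend_bool_mask x window_size (extend_bool_mask x window_size)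

-- ===== LEMMAS AND PROOFS =====

-- B's prefix list, characterised: entry k counts the Trues among the first k elements of x.
theorem pref_eq (x : List Bool) :
    x.foldl (fun pref v => pref ++ [PySem.List.pyGetD pref (-1) 0 + (if v then (1 : Int) else 0)]) [(0 : Int)]
      = (List.range (x.length + 1)).map (fun k => ((x.take k).count true : Int)) := by
  induction x using List.reverseRecOn with
  | nil => simp
  | append_singleton ys v ih =>
    rw [List.foldl_append, ih]
    have hlast : PySem.List.pyGetD ((List.range (ys.length + 1)).map (fun k => ((ys.take k).count true : Int))) (-1) 0
        = ((ys.count true : Int)) := by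
      rw [List.range_succ, List.map_append]
      simp [PySem.List.pyGetD_neg_one_append_singleton]
    simp only [List.foldl_cons, List.foldl_nil, hlast]
    rw [List.length_append, List.length_singleton, List.range_succ (n := ys.length + 1), List.map_append]
    congr 1
    · apply List.map_congr_left
      intro k hk
      rw [List.mem_range] at hk
      rw [List.take_append_of_le_length (by omega)]
    · have h : (ys ++ [v]).take (ys.length + 1) = ys ++ [v] :=
        List.take_of_length_le (by simp)
      simp [h, List.count_append]
      cases v <;> simp

-- A's window count equals B's prefix difference, window by window; only 0 ≤ window_size is needed.
theorem ports_agree (x : List Bool) (w : Int) (hw : 0 ≤ w) :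
    extend_bool_mask x w = extend_bool_mask_alt x w := by
  simp only [extend_bool_mask, extend_bool_mask_alt]
  rw [PySem.List.foldl_append_singleton_eq_map, pref_eq]
  simp only [List.nil_append]
  congr 1
  apply List.map_congr_left
  intro i hi
  rw [PySem.List.mem_pyRange_one] at hi
  obtain ⟨hi0, hi1⟩ := hi
  obtain ⟨a, rfl⟩ : ∃ a : Nat, i = (a : Int) := ⟨i.toNat, (Int.toNat_of_nonneg hi0).symm⟩
  obtain ⟨b, rfl⟩ : ∃ b : Nat, w = (b : Int) := ⟨w.toNat, (Int.toNat_of_nonneg hw).symm⟩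
  have hab : a + b ≤ x.length := by omega
  have hsum : (a : Int) + (b : Int) = ((a + b : Nat) : Int) := by push_cast; ring
  rw [hsum, PySem.List.pyGetD_natCast, PySem.List.pyGetD_natCast]
  rw [List.getD_eq_getElem?_getD, List.getD_eq_getElem?_getD]
  rw [List.getElem?_map, List.getElem?_map]
  rw [List.getElem?_range (by omega), List.getElem?_range (by omega)]
  simp only [Option.map_some, Option.getD_some]
  have hslice : PySem.List.slice x (some (a : Int)) (some ((a + b : Nat) : Int))
      = (x.drop a).take b := by
    rw [← hsum, PySem.List.slice_natCast_add]
  rw [hslice, PySem.List.count_eq]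
  have htake : x.take (a + b) = x.take a ++ (x.drop a).take b := List.take_add ..
  simp only [htake, List.count_append]
  rw [decide_eq_decide]
  push_cast
  omega

-- ===== VERDICT =====
theorem extend_bool_mask_spec : Claim_equal_extend_bool_mask := by
  intro x window_size _hdom hpre
  unfold Spec_extend_bool_mask
  exact ports_agree x window_size hpre.2
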